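-- pv_equiv track=rewrite | github.com/jasonfreak/arena | 1057/250/main.py | minimumChanges
-- ===== SOURCE A (Python) =====
-- def minimumChanges(floor):
--     positiveColors = {}
--     negativeColors = {}
--
--     cntOfRow = len(floor)
--     cntOfCol = len(floor[0])
--
--     for i in range(cntOfRow):
--         for j in range(cntOfCol):
--             if i % 2 == j % 2:
--                 positiveColors[floor[i][j]] = positiveColors.get(floor[i][j], 0) + 1
--             else:
--                 negativeColors[floor[i][j]] = negativeColors.get(floor[i][j], 0) + 1
--
--     positiveColor = max(positiveColors.keys(), key=lambda x: positiveColors[x])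
--     negativeColor = max(negativeColors.keys(), key=lambda x: negativeColors[x])
--
--     if positiveColor != negativeColor:
--         return cntOfRow * cntOfCol - (positiveColors[positiveColor] + negativeColors[negativeColor])
--     else:
--         positiveMax = positiveColors[positiveColor]
--         positiveColors[positiveColor] = 0
--         negativeMax = negativeColors[negativeColor]
--         negativeColors[negativeColor] = 0
--
--         positiveColor = max(positiveColors.keys(), key=lambda x: positiveColors[x])
--         negativeColor = max(negativeColors.keys(), key=lambda x: negativeColors[x])
--
--         return cntOfRow * cntOfCol - max((positiveMax + negativeColors[negativeColor], negativeMax + positiveColors[positiveColor]))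
-- ===== SOURCE B (Python) =====
-- def minimumChanges(floor):
--     rows, cols = len(floor), len(floor[0])
--     pos, neg = {}, {}
--     for i, row in enumerate(floor):
--         for j in range(cols):
--             d = pos if (i + j) % 2 == 0 else neg
--             d[row[j]] = d.get(row[j], 0) + 1
--
--     def padded(d):
--         # every existing color plus the option of repainting to a brand-new color (count 0)
--         return [(c, v) for c, v in d.items()] + [(None, 0)]
--
--     return rows * cols - max(pc + nc
--                              for p, pc in padded(pos)
--                              for n, nc in padded(neg)
--                              if p != n)
-- ===== Notes on version B (the rewrite author's own statement) =====
-- stated objective: alternative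
-- what changed: A greedily takes the argmax color of each parity class and, when they clash, zeroes both entries and recomputes both argmaxes; B does no argmax at all: it counts per parity in one enumerate pass and returns total cells minus the exhaustive maximum of count sums over ALL cross-parity color pairs with distinct colors, each side padded with a fresh-color option of count 0.
import Mathlib
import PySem

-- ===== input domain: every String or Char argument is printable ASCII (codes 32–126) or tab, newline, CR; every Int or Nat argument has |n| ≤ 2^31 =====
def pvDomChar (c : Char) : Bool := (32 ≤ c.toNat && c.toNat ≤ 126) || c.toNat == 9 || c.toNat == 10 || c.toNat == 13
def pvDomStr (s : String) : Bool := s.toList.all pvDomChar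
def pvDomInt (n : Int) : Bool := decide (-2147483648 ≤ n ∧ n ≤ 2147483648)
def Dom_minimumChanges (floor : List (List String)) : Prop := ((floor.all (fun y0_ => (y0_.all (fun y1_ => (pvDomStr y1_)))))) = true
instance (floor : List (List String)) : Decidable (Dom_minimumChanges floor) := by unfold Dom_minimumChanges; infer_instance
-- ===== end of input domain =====

-- B replaces A's greedy argmax selection (with its zero-out-and-recompute clash repair) by one
-- exhaustive maximum of count sums over ALL cross-parity color pairs with distinct colors, each
-- side padded with a fresh-color option of count 0; objective: simpler (no two-phase clash logic).

-- ===== PORT A =====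
-- max(d.keys(), key=lambda x: d[x]) : running max keeping the FIRST maximal key; "" on [] (Python raises there; outside Pre_)
def pvMaxKey (d : PySem.Dict String Int) (keys : List String) : String :=
  match keys with
  | [] => ""
  | k :: ks => ks.foldl (fun best k' => if d.getD k' 0 > d.getD best 0 then k' else best) k

-- one cell of A's nested counting loop: floor[i][j] tallied into positive/negative by parity
def pvCellA (floor : List (List String)) (pn : PySem.Dict String Int × PySem.Dict String Int)
    (i j : Int) : PySem.Dict String Int × PySem.Dict String Int :=
  let c := PySem.List.pyGetD (PySem.List.pyGetD floor i []) j ""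
  if i % 2 == j % 2 then (pn.1.insert c (pn.1.getD c 0 + 1), pn.2)
  else (pn.1, pn.2.insert c (pn.2.getD c 0 + 1))

def minimumChanges (floor : List (List String)) : Int :=
  let cntOfRow : Int := floor.length
  let cntOfCol : Int := (PySem.List.pyGetD floor 0 []).length
  let pn := (PySem.List.pyRange 0 cntOfRow 1).foldl (fun pn i =>
      (PySem.List.pyRange 0 cntOfCol 1).foldl (fun pn j => pvCellA floor pn i j) pn)
    (PySem.Dict.empty, PySem.Dict.empty)
  let positiveColors := pn.1
  let negativeColors := pn.2
  let positiveColor := pvMaxKey positiveColors positiveColors.keys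
  let negativeColor := pvMaxKey negativeColors negativeColors.keys
  if positiveColor ≠ negativeColor then
    cntOfRow * cntOfCol - (positiveColors.getD positiveColor 0 + negativeColors.getD negativeColor 0)
  else
    let positiveMax := positiveColors.getD positiveColor 0
    let positiveColors' := positiveColors.insert positiveColor 0
    let negativeMax := negativeColors.getD negativeColor 0
    let negativeColors' := negativeColors.insert negativeColor 0
    let positiveColor' := pvMaxKey positiveColors' positiveColors'.keys
    let negativeColor' := pvMaxKey negativeColors' negativeColors'.keys
    cntOfRow * cntOfCol - max (positiveMax + negativeColors'.getD negativeColor' 0)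
      (negativeMax + positiveColors'.getD positiveColor' 0)

-- ===== PORT B =====
-- one cell of B's counting loop: ir = (i, row) from enumerate(floor); parity test (i + j) % 2 == 0
def pvCellB (pn : PySem.Dict String Int × PySem.Dict String Int)
    (ir : Int × List String) (j : Int) : PySem.Dict String Int × PySem.Dict String Int :=
  let c := PySem.List.pyGetD ir.2 j ""
  if (ir.1 + j) % 2 == 0 then (pn.1.insert c (pn.1.getD c 0 + 1), pn.2)
  else (pn.1, pn.2.insert c (pn.2.getD c 0 + 1))

-- padded(d): every (color, count) item plus the fresh-color option (None, 0)
def pvPad (d : PySem.Dict String Int) : List (Option String × Int) :=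
  d.items.map (fun p => (some p.1, p.2)) ++ [((none : Option String), (0 : Int))]

def minimumChanges_alt (floor : List (List String)) : Int :=
  let rows : Int := floor.length
  let cols : Int := (PySem.List.pyGetD floor 0 []).length
  let pn := (PySem.List.enumerate floor).foldl (fun pn ir =>
      (PySem.List.pyRange 0 cols 1).foldl (fun pn j => pvCellB pn ir j) pn)
    (PySem.Dict.empty, PySem.Dict.empty)
  -- max over the generator of pc + nc for distinct-color cross pairs (nonempty inside Pre_)
  let cands := (pvPad pn.1).flatMap
    (fun p => ((pvPad pn.2).filter (fun q => !(p.1 == q.1))).map (fun q => p.2 + q.2))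
  rows * cols - (PySem.List.max? cands (fun x => x)).getD 0

-- ===== PRECONDITION & SPEC =====
-- Pre_ = exactly the inputs A returns on: nonempty grid, every row at least as long as row 0
-- (shorter rows raise IndexError), and at least two cells (a 1x1 grid makes negativeColors empty
-- and max() raise ValueError; so does an empty first row).
def Pre_minimumChanges (floor : List (List String)) : Prop :=
  floor ≠ [] ∧ 0 < (floor.headD []).length ∧ 2 ≤ floor.length * (floor.headD []).length ∧
    ∀ row ∈ floor, (floor.headD []).length ≤ row.length
instance (floor : List (List String)) : Decidable (Pre_minimumChanges floor) := by
  unfold Pre_minimumChanges; infer_instance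
def pvWitness_minimumChanges : List (List String) := [["a"], ["b"]]

def Spec_minimumChanges (floor : List (List String)) (out : Int) : Prop := out = minimumChanges_alt floor
instance (floor : List (List String)) (out : Int) : Decidable (Spec_minimumChanges floor out) := by unfold Spec_minimumChanges; infer_instance

-- ===== CLAIM (what is proved, stated in full; the proofs are below) =====
def Claim_equal_minimumChanges : Prop := ∀ (floor : List (List String)), Dom_minimumChanges floor → Pre_minimumChanges floor → Spec_minimumChanges floor (minimumChanges floor)

-- ===== LEMMAS AND PROOFS =====

-- A's selection phase on the two finished dicts (the amount A keeps unchanged)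
def pvAK (P N : PySem.Dict String Int) : Int :=
  let pc := pvMaxKey P P.keys
  let nc := pvMaxKey N N.keys
  if pc ≠ nc then P.getD pc 0 + N.getD nc 0
  else
    let pMax := P.getD pc 0
    let P' := P.insert pc 0
    let nMax := N.getD nc 0
    let N' := N.insert nc 0
    max (pMax + N'.getD (pvMaxKey N' N'.keys) 0) (nMax + P'.getD (pvMaxKey P' P'.keys) 0)

-- B's selection phase: exhaustive max over all distinct-color padded cross pairs
def pvCands (P N : PySem.Dict String Int) : List Int :=
  (pvPad P).flatMap (fun p => ((pvPad N).filter (fun q => !(p.1 == q.1))).map (fun q => p.2 + q.2))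

def pvBK (P N : PySem.Dict String Int) : Int :=
  (PySem.List.max? (pvCands P N) (fun x => x)).getD 0

lemma pvArgmax_mem (d : PySem.Dict String Int) (ks : List String) (a : String) :
    ks.foldl (fun best k' => if d.getD k' 0 > d.getD best 0 then k' else best) a ∈ a :: ks := by
  induction ks generalizing a with
  | nil => simp
  | cons k t ih =>
    have h := ih (if d.getD k 0 > d.getD a 0 then k else a)
    simp only [List.foldl_cons]
    rcases List.mem_cons.mp h with h' | h'
    · rw [h']; split <;> simp
    · simp [h']

lemma pvArgmax_ge (d : PySem.Dict String Int) (ks : List String) (a : String) :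
    d.getD a 0 ≤ d.getD (ks.foldl (fun best k' => if d.getD k' 0 > d.getD best 0 then k' else best) a) 0 ∧
    ∀ x ∈ ks, d.getD x 0 ≤ d.getD (ks.foldl (fun best k' => if d.getD k' 0 > d.getD best 0 then k' else best) a) 0 := by
  induction ks generalizing a with
  | nil => simp
  | cons k t ih =>
    have h := ih (if d.getD k 0 > d.getD a 0 then k else a)
    simp only [List.foldl_cons]
    refine ⟨?_, fun x hx => ?_⟩
    · refine le_trans ?_ h.1
      split <;> omega
    · rcases List.mem_cons.mp hx with rfl | hx
      · refine le_trans ?_ h.1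
        split <;> omega
      · exact h.2 x hx

lemma pvMaxKey_mem (d : PySem.Dict String Int) (keys : List String) (h : keys ≠ []) :
    pvMaxKey d keys ∈ keys := by
  cases keys with
  | nil => simp at h
  | cons k ks => exact pvArgmax_mem d ks k

lemma pvMaxKey_isMax (d : PySem.Dict String Int) (keys : List String) :
    ∀ x ∈ keys, d.getD x 0 ≤ d.getD (pvMaxKey d keys) 0 := by
  cases keys with
  | nil => simp
  | cons k ks =>
    intro x hx
    rcases List.mem_cons.mp hx with rfl | hx
    · exact (pvArgmax_ge d ks x).1
    · exact (pvArgmax_ge d ks k).2 x hx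

-- dict toolkit
lemma pv_mem_items_of_mem_keys (d : PySem.Dict String Int) (k : String) (hk : k ∈ d.keys) :
    (k, d.getD k 0) ∈ d.items := by
  have h1 : ¬ d.get? k = none := by
    rw [PySem.Dict.get?_eq_none_iff_not_mem_keys]; simp [hk]
  obtain ⟨v, hv⟩ := Option.ne_none_iff_exists'.mp h1
  have h2 := PySem.Dict.mem_items_of_get?_eq_some d hv
  rwa [PySem.Dict.getD_eq_get?_getD, hv]

lemma pv_getD_of_mem_items' (d : PySem.Dict String Int) (hnd : d.keys.Nodup)
    (p : String × Int) (hp : p ∈ d.items) : p.2 = d.getD p.1 0 ∧ p.1 ∈ d.keys := by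
  obtain ⟨k, v⟩ := p
  exact ⟨(PySem.Dict.getD_of_mem_items d hp hnd 0).symm, PySem.Dict.mem_keys_of_mem_items d hp⟩

-- counting invariant: nodup keys and every stored count ≥ 1
def pvInv (pn : PySem.Dict String Int × PySem.Dict String Int) : Prop :=
  pn.1.keys.Nodup ∧ pn.2.keys.Nodup ∧ (∀ k ∈ pn.1.keys, 1 ≤ pn.1.getD k 0) ∧
    (∀ k ∈ pn.2.keys, 1 ≤ pn.2.getD k 0)

lemma pv_bump_inv (d : PySem.Dict String Int) (c : String) (hnd : d.keys.Nodup)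
    (hv : ∀ k ∈ d.keys, 1 ≤ d.getD k 0) :
    (d.insert c (d.getD c 0 + 1)).keys.Nodup ∧
      ∀ k ∈ (d.insert c (d.getD c 0 + 1)).keys, 1 ≤ (d.insert c (d.getD c 0 + 1)).getD k 0 := by
  refine ⟨PySem.Dict.nodup_keys_insert d c _ hnd, fun k hk => ?_⟩
  rw [PySem.Dict.getD_insert]
  rcases (PySem.Dict.mem_keys_insert d c k _).mp hk with rfl | hk'
  · have : (0:Int) ≤ d.getD k 0 := by
      by_cases hc : d.contains k = true
      · exact le_trans (by norm_num) (hv k ((PySem.Dict.contains_iff_mem_keys d k).mp hc))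
      · rw [PySem.Dict.getD_of_not_contains d 0 (by simpa using hc)]
    simp; omega
  · by_cases hkc : k = c
    · subst hkc
      have : (0:Int) ≤ d.getD k 0 := le_trans (by norm_num) (hv k hk')
      simp; omega
    · rw [if_neg hkc]; exact hv k hk'

lemma pv_foldl_inv {α σ : Type} (P : σ → Prop) (f : σ → α → σ) (l : List α) (init : σ)
    (hstep : ∀ s x, P s → P (f s x)) (h0 : P init) : P (l.foldl f init) := by
  induction l generalizing init with
  | nil => exact h0
  | cons x t ih => exact ih (f init x) (hstep init x h0)

lemma pvCellA_inv (floor : List (List String)) (pn) (i j : Int) (h : pvInv pn) :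
    pvInv (pvCellA floor pn i j) := by
  obtain ⟨h1, h2, h3, h4⟩ := h
  unfold pvCellA pvInv
  split
  · exact ⟨(pv_bump_inv pn.1 _ h1 h3).1, h2, (pv_bump_inv pn.1 _ h1 h3).2, h4⟩
  · exact ⟨h1, (pv_bump_inv pn.2 _ h2 h4).1, h3, (pv_bump_inv pn.2 _ h2 h4).2⟩

lemma pvCellA_mono (floor : List (List String)) (pn) (i j : Int) (x y : String) :
    (pn.1.contains x → (pvCellA floor pn i j).1.contains x) ∧
    (pn.2.contains y → (pvCellA floor pn i j).2.contains y) := by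
  unfold pvCellA
  split <;> simp [PySem.Dict.contains_insert] <;> intro h <;> simp [h]

-- (i + j) % 2 == 0 is the same Boolean test as i % 2 == j % 2
lemma pvParity_beq (i j : Int) : ((i + j) % 2 == 0) = (i % 2 == j % 2) := by
  rw [Bool.eq_iff_iff]
  simp only [beq_iff_eq]
  omega

lemma pvCell_eq (fl : List (List String)) (pn) (i j : Int) :
    pvCellB pn (i, PySem.List.pyGetD fl i []) j = pvCellA fl pn i j := by
  unfold pvCellB pvCellA
  rw [pvParity_beq]

-- the two counting passes build the same pair of dicts
lemma pvCount_eq (floor : List (List String)) (cols : Int) :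
    (PySem.List.enumerate floor).foldl (fun pn ir =>
        (PySem.List.pyRange 0 cols 1).foldl (fun pn j => pvCellB pn ir j) pn)
      (PySem.Dict.empty, PySem.Dict.empty) =
    (PySem.List.pyRange 0 (floor.length : Int) 1).foldl (fun pn i =>
        (PySem.List.pyRange 0 cols 1).foldl (fun pn j => pvCellA floor pn i j) pn)
      (PySem.Dict.empty, PySem.Dict.empty) := by
  rw [PySem.List.enumerate_eq_map_pyRange floor [], List.foldl_map]
  simp only [PySem.List.len_eq]
  apply PySem.List.foldl_congr_mem
  intro acc i _
  apply PySem.List.foldl_congr_mem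
  intro acc' j _
  exact pvCell_eq floor acc' i j

-- padded-pair machinery for B's selection
lemma pv_mem_pad_cases (d : PySem.Dict String Int) (hnd : d.keys.Nodup)
    (q : Option String × Int) (hq : q ∈ pvPad d) :
    q = (none, 0) ∨ ∃ k, k ∈ d.keys ∧ q = (some k, d.getD k 0) := by
  unfold pvPad at hq
  rcases List.mem_append.mp hq with h | h
  · obtain ⟨p, hp, rfl⟩ := List.mem_map.mp h
    obtain ⟨hv, hkmem⟩ := pv_getD_of_mem_items' d hnd p hp
    right; exact ⟨p.1, hkmem, by rw [hv]⟩
  · left; simpa using h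

lemma pv_pad_mem_of_key (d : PySem.Dict String Int) (k : String) (hk : k ∈ d.keys) :
    (some k, d.getD k 0) ∈ pvPad d := by
  unfold pvPad
  exact List.mem_append.mpr (Or.inl (List.mem_map.mpr
    ⟨(k, d.getD k 0), pv_mem_items_of_mem_keys d k hk, rfl⟩))

lemma pv_none_mem_pad (d : PySem.Dict String Int) :
    ((none : Option String), (0 : Int)) ∈ pvPad d := by simp [pvPad]

lemma pv_mem_cands (P N : PySem.Dict String Int) (x : Int) :
    x ∈ pvCands P N ↔ ∃ p ∈ pvPad P, ∃ q ∈ pvPad N, p.1 ≠ q.1 ∧ x = p.2 + q.2 := by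
  unfold pvCands
  simp only [List.mem_flatMap, List.mem_map, List.mem_filter]
  constructor
  · rintro ⟨p, hp, q, ⟨hq, hne⟩, rfl⟩
    exact ⟨p, hp, q, hq, by simpa using hne, rfl⟩
  · rintro ⟨p, hp, q, hq, hne, rfl⟩
    exact ⟨p, hp, q, ⟨hq, by simpa using hne⟩, rfl⟩

lemma pvBK_eq_of (P N : PySem.Dict String Int) (K : Int)
    (hmem : K ∈ pvCands P N) (hub : ∀ x ∈ pvCands P N, x ≤ K) : pvBK P N = K := by
  unfold pvBK
  cases hmax : PySem.List.max? (pvCands P N) (fun x => x) with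
  | none =>
    rw [PySem.List.max?_eq_none_iff] at hmax
    rw [hmax] at hmem; simp at hmem
  | some m =>
    have h1 := PySem.List.max?_mem hmax
    have h2 := PySem.List.max?_isMax hmax
    simpa using le_antisymm (hub m h1) (h2 K hmem)

-- the heart: A's two-phase argmax selection equals B's maximum over ALL distinct padded pairs
lemma pvSel_eq (P N : PySem.Dict String Int)
    (hPne : P.keys ≠ []) (hNne : N.keys ≠ [])
    (hPnd : P.keys.Nodup) (hNnd : N.keys.Nodup)
    (hPv : ∀ k ∈ P.keys, 1 ≤ P.getD k 0) (hNv : ∀ k ∈ N.keys, 1 ≤ N.getD k 0) :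
    pvAK P N = pvBK P N := by
  have hPCmem := pvMaxKey_mem P P.keys hPne
  have hNCmem := pvMaxKey_mem N N.keys hNne
  have hPCmax := pvMaxKey_isMax P P.keys
  have hNCmax := pvMaxKey_isMax N N.keys
  by_cases hne : pvMaxKey P P.keys ≠ pvMaxKey N N.keys
  · -- branch 1: distinct top colors
    have hAK : pvAK P N = P.getD (pvMaxKey P P.keys) 0 + N.getD (pvMaxKey N N.keys) 0 := by
      unfold pvAK; rw [if_pos hne]
    rw [hAK]
    symm
    apply pvBK_eq_of
    · rw [pv_mem_cands]
      exact ⟨_, pv_pad_mem_of_key P _ hPCmem, _, pv_pad_mem_of_key N _ hNCmem,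
        by simpa using hne, rfl⟩
    · intro x hx
      rw [pv_mem_cands] at hx
      obtain ⟨p, hp, q, hq, -, rfl⟩ := hx
      have hple : p.2 ≤ P.getD (pvMaxKey P P.keys) 0 := by
        rcases pv_mem_pad_cases P hPnd p hp with rfl | ⟨k, hk, rfl⟩
        · exact le_trans (by norm_num) (hPv _ hPCmem)
        · exact hPCmax k hk
      have hqle : q.2 ≤ N.getD (pvMaxKey N N.keys) 0 := by
        rcases pv_mem_pad_cases N hNnd q hq with rfl | ⟨k, hk, rfl⟩
        · exact le_trans (by norm_num) (hNv _ hNCmem)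
        · exact hNCmax k hk
      exact add_le_add hple hqle
  · -- branch 2: same top color c
    rw [not_ne_iff] at hne
    set c := pvMaxKey P P.keys with hc
    have hNCc : pvMaxKey N N.keys = c := hne.symm
    rw [hNCc] at hNCmem hNCmax
    set P' := P.insert c 0 with hP'
    set N' := N.insert c 0 with hN'
    have hkP' : P'.keys = P.keys :=
      PySem.Dict.keys_insert_of_contains P 0 ((PySem.Dict.contains_iff_mem_keys P c).mpr hPCmem)
    have hkN' : N'.keys = N.keys :=
      PySem.Dict.keys_insert_of_contains N 0 ((PySem.Dict.contains_iff_mem_keys N c).mpr hNCmem)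
    set PC2 := pvMaxKey P' P'.keys with hPC2
    set NC2 := pvMaxKey N' N'.keys with hNC2
    have hPC2mem : PC2 ∈ P.keys := by rw [← hkP']; exact pvMaxKey_mem P' P'.keys (by rw [hkP']; exact hPne)
    have hNC2mem : NC2 ∈ N.keys := by rw [← hkN']; exact pvMaxKey_mem N' N'.keys (by rw [hkN']; exact hNne)
    have hPC2max : ∀ x ∈ P.keys, P'.getD x 0 ≤ P'.getD PC2 0 := by
      intro x hx; exact pvMaxKey_isMax P' P'.keys x (by rw [hkP']; exact hx)
    have hNC2max : ∀ x ∈ N.keys, N'.getD x 0 ≤ N'.getD NC2 0 := by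
      intro x hx; exact pvMaxKey_isMax N' N'.keys x (by rw [hkN']; exact hx)
    have hP'c : P'.getD c 0 = 0 := by rw [hP', PySem.Dict.getD_insert]; simp
    have hN'c : N'.getD c 0 = 0 := by rw [hN', PySem.Dict.getD_insert]; simp
    have hP'other : ∀ k, k ≠ c → P'.getD k 0 = P.getD k 0 := by
      intro k hk; rw [hP', PySem.Dict.getD_insert, if_neg hk]
    have hN'other : ∀ k, k ≠ c → N'.getD k 0 = N.getD k 0 := by
      intro k hk; rw [hN', PySem.Dict.getD_insert, if_neg hk]
    have hP'pos : 0 ≤ P'.getD PC2 0 := le_of_eq_of_le hP'c.symm (hPC2max c hPCmem)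
    have hN'pos : 0 ≤ N'.getD NC2 0 := le_of_eq_of_le hN'c.symm (hNC2max c hNCmem)
    have hAK : pvAK P N = max (P.getD c 0 + N'.getD NC2 0) (N.getD c 0 + P'.getD PC2 0) := by
      unfold pvAK
      rw [if_neg (by rw [← hc, hNCc]; simp)]
      rw [← hc, hNCc]
    rw [hAK]
    symm
    apply pvBK_eq_of
    · -- the attained branch of the max is a candidate
      have hc1 : P.getD c 0 + N'.getD NC2 0 ∈ pvCands P N := by
        rw [pv_mem_cands]
        by_cases hq : NC2 = c
        · refine ⟨_, pv_pad_mem_of_key P c hPCmem, (none, 0), pv_none_mem_pad N, by simp, ?_⟩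
          rw [hq, hN'c]
        · refine ⟨_, pv_pad_mem_of_key P c hPCmem, _, pv_pad_mem_of_key N NC2 hNC2mem,
            by simp; exact fun h => hq h.symm, ?_⟩
          rw [hN'other NC2 hq]
      have hc2 : N.getD c 0 + P'.getD PC2 0 ∈ pvCands P N := by
        rw [pv_mem_cands]
        by_cases hp : PC2 = c
        · refine ⟨(none, 0), pv_none_mem_pad P, _, pv_pad_mem_of_key N c hNCmem, by simp, ?_⟩
          rw [hp, hP'c]; ring
        · refine ⟨_, pv_pad_mem_of_key P PC2 hPC2mem, _, pv_pad_mem_of_key N c hNCmem,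
            by simp [hp], ?_⟩
          rw [hP'other PC2 hp]; ring
      rcases max_choice (P.getD c 0 + N'.getD NC2 0) (N.getD c 0 + P'.getD PC2 0) with h | h
        <;> rw [h]
      · exact hc1
      · exact hc2
    · intro x hx
      rw [pv_mem_cands] at hx
      obtain ⟨p, hp, q, hq, hpq, rfl⟩ := hx
      by_cases hq1 : q.1 = some c
      · -- q is the top color on the negative side; p must avoid c
        have hq2 : q.2 = N.getD c 0 := by
          rcases pv_mem_pad_cases N hNnd q hq with rfl | ⟨k, hk, rfl⟩
          · simp at hq1
          · simp at hq1; rw [hq1]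
        have hple : p.2 ≤ P'.getD PC2 0 := by
          rcases pv_mem_pad_cases P hPnd p hp with rfl | ⟨k, hk, rfl⟩
          · exact hP'pos
          · have hkc : k ≠ c := by rintro rfl; exact hpq (by rw [hq1])
            calc (P.getD k 0 : Int) = P'.getD k 0 := (hP'other k hkc).symm
              _ ≤ P'.getD PC2 0 := hPC2max k hk
        calc p.2 + q.2 ≤ P'.getD PC2 0 + N.getD c 0 := by rw [hq2]; exact add_le_add hple le_rfl
          _ = N.getD c 0 + P'.getD PC2 0 := by ring
          _ ≤ _ := le_max_right _ _
      · -- q avoids c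
        have hqle : q.2 ≤ N'.getD NC2 0 := by
          rcases pv_mem_pad_cases N hNnd q hq with rfl | ⟨k, hk, rfl⟩
          · exact hN'pos
          · have hkc : k ≠ c := by rintro rfl; exact hq1 rfl
            calc (N.getD k 0 : Int) = N'.getD k 0 := (hN'other k hkc).symm
              _ ≤ N'.getD NC2 0 := hNC2max k hk
        have hple : p.2 ≤ P.getD c 0 := by
          rcases pv_mem_pad_cases P hPnd p hp with rfl | ⟨k, hk, rfl⟩
          · exact le_trans (by norm_num) (hPv _ hPCmem)
          · exact hPCmax k hk
        exact le_trans (add_le_add hple hqle) (le_max_left _ _)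

-- bridging the ports to pvAK/pvBK over a named counting fold
def pvCountA (fl : List (List String)) : PySem.Dict String Int × PySem.Dict String Int :=
  (PySem.List.pyRange 0 (fl.length : Int) 1).foldl (fun pn i =>
      (PySem.List.pyRange 0 (((PySem.List.pyGetD fl 0 []).length : Int)) 1).foldl
        (fun pn j => pvCellA fl pn i j) pn)
    (PySem.Dict.empty, PySem.Dict.empty)

lemma pvA_eq (fl : List (List String)) : minimumChanges fl =
    (fl.length : Int) * ((PySem.List.pyGetD fl 0 []).length : Int) -
      pvAK (pvCountA fl).1 (pvCountA fl).2 := by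
  unfold minimumChanges pvAK pvCountA
  dsimp only
  split <;> rfl

lemma pvB_eq (fl : List (List String)) : minimumChanges_alt fl =
    (fl.length : Int) * ((PySem.List.pyGetD fl 0 []).length : Int) -
      pvBK (pvCountA fl).1 (pvCountA fl).2 := by
  dsimp only [minimumChanges_alt, pvBK, pvCands, pvCountA]
  rw [pvCount_eq]

lemma pvFold_mono₁ (fl : List (List String)) (cols : Int) (L : List Int) (pn) (x : String)
    (h : pn.1.contains x = true) :
    (L.foldl (fun pn i => (PySem.List.pyRange 0 cols 1).foldl
      (fun pn j => pvCellA fl pn i j) pn) pn).1.contains x = true := by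
  apply pv_foldl_inv (fun pn => pn.1.contains x = true) _ L pn ?_ h
  intro s i hs
  exact pv_foldl_inv (fun pn => pn.1.contains x = true) _ _ s
    (fun s j hs => (pvCellA_mono fl s i j x x).1 hs) hs

lemma pvFold_mono₂ (fl : List (List String)) (cols : Int) (L : List Int) (pn) (x : String)
    (h : pn.2.contains x = true) :
    (L.foldl (fun pn i => (PySem.List.pyRange 0 cols 1).foldl
      (fun pn j => pvCellA fl pn i j) pn) pn).2.contains x = true := by
  apply pv_foldl_inv (fun pn => pn.2.contains x = true) _ L pn ?_ h
  intro s i hs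
  exact pv_foldl_inv (fun pn => pn.2.contains x = true) _ _ s
    (fun s j hs => (pvCellA_mono fl s i j x x).2 hs) hs

lemma pvInner_mono₁ (fl : List (List String)) (i : Int) (L : List Int) (pn) (x : String)
    (h : pn.1.contains x = true) :
    (L.foldl (fun pn j => pvCellA fl pn i j) pn).1.contains x = true :=
  pv_foldl_inv (fun pn => pn.1.contains x = true) _ L pn
    (fun s j hs => (pvCellA_mono fl s i j x x).1 hs) h

lemma pvInner_mono₂ (fl : List (List String)) (i : Int) (L : List Int) (pn) (x : String)
    (h : pn.2.contains x = true) :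
    (L.foldl (fun pn j => pvCellA fl pn i j) pn).2.contains x = true :=
  pv_foldl_inv (fun pn => pn.2.contains x = true) _ L pn
    (fun s j hs => (pvCellA_mono fl s i j x x).2 hs) h

lemma pv_keys_ne_nil_of_contains (d : PySem.Dict String Int) (x : String)
    (h : d.contains x = true) : d.keys ≠ [] :=
  List.ne_nil_of_mem ((PySem.Dict.contains_iff_mem_keys d x).mp h)

-- ===== VERDICT (by name: the statement is the Claim_ definition above) =====
theorem minimumChanges_spec : Claim_equal_minimumChanges := by
  intro floor hdom hpre
  unfold Spec_minimumChanges
  obtain ⟨hnil, hcol, hsz, -⟩ := hpre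
  obtain ⟨r0, rest, rfl⟩ := List.exists_cons_of_ne_nil hnil
  have hget0 : PySem.List.pyGetD (r0 :: rest) 0 [] = r0 := PySem.List.pyGetD_zero_cons r0 rest []
  simp only [List.headD_cons] at hcol hsz
  have hrows : (0:Int) < (((r0 :: rest).length : Nat) : Int) := by simp
  have hcols : (0:Int) < ((PySem.List.pyGetD (r0 :: rest) 0 []).length : Int) := by
    rw [hget0]; exact_mod_cast hcol
  -- the counting invariant
  have hInv : pvInv (pvCountA (r0 :: rest)) := by
    unfold pvCountA
    apply pv_foldl_inv pvInv _ _ _ ?_ ?_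
    · intro s i hs
      exact pv_foldl_inv pvInv _ _ s (fun s j hs => pvCellA_inv _ s i j hs) hs
    · refine ⟨PySem.Dict.nodup_keys_empty, PySem.Dict.nodup_keys_empty, ?_, ?_⟩ <;>
        · intro k hk; simp [PySem.Dict.keys_empty] at hk
  -- the positive dict is nonempty: cell (0,0)
  have hPne : (pvCountA (r0 :: rest)).1.keys ≠ [] := by
    apply pv_keys_ne_nil_of_contains _ (PySem.List.pyGetD (PySem.List.pyGetD (r0 :: rest) 0 []) 0 "")
    unfold pvCountA
    rw [PySem.List.pyRange_one_cons hrows, List.foldl_cons]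
    apply pvFold_mono₁
    rw [PySem.List.pyRange_one_cons hcols, List.foldl_cons]
    apply pvInner_mono₁
    unfold pvCellA
    rw [if_pos (by decide)]
    exact PySem.Dict.contains_insert_self _ _ _
  -- the negative dict is nonempty: cell (0,1) if cols ≥ 2, else cell (1,0)
  have hNne : (pvCountA (r0 :: rest)).2.keys ≠ [] := by
    rcases Nat.lt_or_ge 1 r0.length with h2c | h1c
    · -- cols ≥ 2 : cell (0,1)
      apply pv_keys_ne_nil_of_contains _ (PySem.List.pyGetD (PySem.List.pyGetD (r0 :: rest) 0 []) 1 "")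
      unfold pvCountA
      rw [PySem.List.pyRange_one_cons hrows, List.foldl_cons]
      apply pvFold_mono₂
      have h2c' : (1:Int) < ((PySem.List.pyGetD (r0 :: rest) 0 []).length : Int) := by
        rw [hget0]; exact_mod_cast h2c
      rw [PySem.List.pyRange_one_cons hcols, (by norm_num : (0:Int) + 1 = 1),
        PySem.List.pyRange_one_cons h2c', List.foldl_cons, List.foldl_cons]
      apply pvInner_mono₂
      conv => lhs; rw [pvCellA]
      rw [if_neg (by decide)]
      exact PySem.Dict.contains_insert_self _ _ _
    · -- cols = 1, so rows ≥ 2 : cell (1,0)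
      have hc1 : r0.length = 1 := le_antisymm h1c hcol
      have hr2 : 2 ≤ (r0 :: rest).length := by
        rw [hc1, Nat.mul_one] at hsz; exact hsz
      apply pv_keys_ne_nil_of_contains _ (PySem.List.pyGetD (PySem.List.pyGetD (r0 :: rest) 1 []) 0 "")
      unfold pvCountA
      have h2r : (1:Int) < (((r0 :: rest).length : Nat) : Int) := by exact_mod_cast hr2
      rw [PySem.List.pyRange_one_cons hrows, (by norm_num : (0:Int) + 1 = 1),
        PySem.List.pyRange_one_cons h2r, List.foldl_cons, List.foldl_cons]
      apply pvFold_mono₂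
      rw [PySem.List.pyRange_one_cons hcols, List.foldl_cons]
      apply pvInner_mono₂
      conv => lhs; rw [pvCellA]
      rw [if_neg (by decide)]
      exact PySem.Dict.contains_insert_self _ _ _
  obtain ⟨hPnd, hNnd, hPv, hNv⟩ := hInv
  rw [pvA_eq, pvB_eq, pvSel_eq _ _ hPne hNne hPnd hNnd hPv hNv]
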